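-- pv_equiv track=rewrite | github.com/katherine-davis/katherine-davis.github.io | day 17.py | aNoZ
-- ===== SOURCE A (Python) =====
-- def aNoZ (word):
--     flag = False
--     for index in range (0,len(word)):
--         letter = word[index]
--         if letter == "z":
--             flag = False
--         elif letter == "a":
--             flag = True
--     if flag == True:
--         return True
--     else:
--         return False
-- ===== SOURCE B (Python) =====
-- def aNoZ(word):
--     filtered = [c for c in word if c == "a" or c == "z"]
--     return bool(filtered) and filtered[-1] == "a"
-- ===== Notes on version B (the rewrite author's own statement) =====
-- stated objective: idiomatic
-- what changed: Replaces the flag-tracking forward loop with filtering out the 'a'/'z' letters and checking whether the last one is 'a'.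
import Mathlib
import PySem

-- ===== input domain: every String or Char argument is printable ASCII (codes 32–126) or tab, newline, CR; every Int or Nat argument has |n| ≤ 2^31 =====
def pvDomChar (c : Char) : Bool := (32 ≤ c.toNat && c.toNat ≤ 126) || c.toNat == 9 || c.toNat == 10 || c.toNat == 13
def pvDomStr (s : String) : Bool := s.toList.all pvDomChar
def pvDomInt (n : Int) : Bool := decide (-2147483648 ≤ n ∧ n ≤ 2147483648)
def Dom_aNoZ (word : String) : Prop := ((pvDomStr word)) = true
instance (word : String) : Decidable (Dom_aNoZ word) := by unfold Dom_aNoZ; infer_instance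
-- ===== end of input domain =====

-- B replaces A's flag-tracking forward loop by filtering the 'a'/'z' letters and testing the last one (idiomatic decomposition, same cost).

-- ===== PORT A =====
-- A: forward loop over the characters, maintaining a flag.
def aNoZ (word : String) : Bool :=
  word.toList.foldl
    (fun flag letter =>
      if letter == 'z' then false
      else if letter == 'a' then true
      else flag)
    false

-- ===== PORT B =====
-- B: filter the 'a'/'z' letters; True iff the filtered list is nonempty and ends in 'a'.
def aNoZ_alt (word : String) : Bool :=
  let filtered := word.toList.filter (fun c => c == 'a' || c == 'z')
  match filtered.getLast? with
  | some c => c == 'a'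
  | none => false

-- ===== PRECONDITION & SPEC =====
def Spec_aNoZ (word : String) (out : Bool) : Prop := out = aNoZ_alt word
instance (word : String) (out : Bool) : Decidable (Spec_aNoZ word out) := by unfold Spec_aNoZ; infer_instance

-- ===== CLAIM (what is proved, stated in full; the proofs are below) =====
def Claim_equal_aNoZ : Prop := ∀ (word : String), Dom_aNoZ word → Spec_aNoZ word (aNoZ word)

-- ===== LEMMAS AND PROOFS =====

-- A's fold equals "last filtered letter is 'a'", with the initial flag as default when no 'a'/'z' occurs.
theorem aNoZ_fold_eq_last (l : List Char) (flag : Bool) :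
    l.foldl (fun flag letter =>
        if letter == 'z' then false
        else if letter == 'a' then true
        else flag) flag
      = (match (l.filter (fun c => c == 'a' || c == 'z')).getLast? with
         | some c => c == 'a'
         | none => flag) := by
  induction l using List.reverseRecOn generalizing flag with
  | nil => rfl
  | append_singleton l c ih =>
    rw [List.foldl_append, List.filter_append, ih]
    by_cases hz : c = 'z'
    · simp [hz]
    · by_cases ha : c = 'a'
      · simp [ha]
      · simp [hz, ha]

-- ===== VERDICT (by name: the statement is the Claim_ definition above) =====
theorem aNoZ_spec : Claim_equal_aNoZ := by
  intro word _
  unfold Spec_aNoZ aNoZ aNoZ_alt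
  exact aNoZ_fold_eq_last word.toList false
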